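-- pv_equiv track=rewrite | github.com/Lyhappig/HustThesis | quantum/utils/check_mul.py | gf16_mul2_inv
-- ===== SOURCE A (Python) =====
-- from typing import List
--
-- def gf16_mul2_inv(x, y, z) -> List[List[int]]:
--     a = [0 for _ in range(4)]
--     b = [0 for _ in range(4)]
--     d = [0 for _ in range(19)]
--     for i in range(4):
--         a[i] = x[i]
--         b[i] = y[i]
--         d[i] = z[i]
--
--     def cx(x, y):
--         return x ^ y
--
--     def ccx(y, z, x):
--         return x ^ y * z
--
--     d[6] = cx(a[3], d[6])
--     d[6] = cx(a[1], d[6])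
--     d[7] = cx(b[3], d[7])
--     d[7] = cx(b[1], d[7])
--     d[8] = cx(a[3], d[8])
--     d[8] = cx(a[2], d[8])
--     d[9] = cx(b[3], d[9])
--     d[9] = cx(b[2], d[9])
--     d[10] = cx(a[2], d[10])
--     d[10] = cx(a[0], d[10])
--     d[11] = cx(b[2], d[11])
--     d[11] = cx(b[0], d[11])
--     d[4] = cx(d[6], d[4])
--     d[4] = cx(d[10], d[4])
--     d[5] = cx(d[7], d[5])
--     d[5] = cx(d[11], d[5])
--     d[12] = cx(a[1], d[12])
--     d[12] = cx(a[0], d[12])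
--     d[13] = cx(b[1], d[13])
--     d[13] = cx(b[0], d[13])
--     d[14] = ccx(d[10], d[11], d[14])
--     d[15] = ccx(a[3], b[3], d[15])
--     d[16] = ccx(a[2], b[2], d[16])
--     d[17] = ccx(a[1], b[1], d[17])
--     d[18] = ccx(a[0], b[0], d[18])
--     d[3] = cx(d[17], d[3])
--     d[3] = cx(d[16], d[3])
--     d[3] = cx(d[15], d[3])
--     d[2] = cx(d[18], d[2])
--     d[2] = cx(d[15], d[2])
--     d[2] = cx(d[3], d[2])
--     d[1] = cx(d[16], d[1])
--     d[1] = cx(d[15], d[1])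
--     d[1] = cx(d[14], d[1])
--     d[0] = cx(d[15], d[0])
--     d[0] = cx(d[2], d[0])
--     d[0] = cx(d[1], d[0])
--     d[18] = ccx(a[0], b[0], d[18])
--     d[17] = ccx(a[1], b[1], d[17])
--     d[16] = ccx(a[2], b[2], d[16])
--     d[15] = ccx(a[3], b[3], d[15])
--     d[14] = ccx(d[10], d[11], d[14])
--     d[3] = ccx(d[12], d[13], d[3])
--     d[2] = ccx(d[8], d[9], d[2])
--     d[1] = ccx(d[6], d[7], d[1])
--     d[0] = ccx(d[4], d[5], d[0])
--     d[13] = cx(b[1], d[13])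
--     d[13] = cx(b[0], d[13])
--     d[12] = cx(a[1], d[12])
--     d[12] = cx(a[0], d[12])
--     d[5] = cx(d[7], d[5])
--     d[5] = cx(d[11], d[5])
--     d[4] = cx(d[6], d[4])
--     d[4] = cx(d[10], d[4])
--     d[11] = cx(b[2], d[11])
--     d[11] = cx(b[0], d[11])
--     d[10] = cx(a[2], d[10])
--     d[10] = cx(a[0], d[10])
--     d[9] = cx(b[3], d[9])
--     d[9] = cx(b[2], d[9])
--     d[8] = cx(a[3], d[8])
--     d[8] = cx(a[2], d[8])
--     d[7] = cx(b[3], d[7])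
--     d[7] = cx(b[1], d[7])
--     d[6] = cx(a[3], d[6])
--     d[6] = cx(a[1], d[6])
--     return [a, b, d]
-- ===== SOURCE B (Python) =====
-- def gf16_mul2_inv(x, y, z):
--     # Closed form of the net circuit effect: the uncompute half of the
--     # original restores all scratch registers d[4..18] to 0, so only
--     # d[0..3] carry results.  Same IndexError behaviour on short inputs.
--     a0, a1, a2, a3 = x[0], x[1], x[2], x[3]
--     b0, b1, b2, b3 = y[0], y[1], y[2], y[3]
--     z0, z1, z2, z3 = z[0], z[1], z[2], z[3]
--     p0, p1, p2, p3 = a0 * b0, a1 * b1, a2 * b2, a3 * b3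
--     c3 = z3 ^ p1 ^ p2 ^ p3
--     c2 = z2 ^ p0 ^ p3 ^ c3
--     c1 = z1 ^ p2 ^ p3 ^ (a2 ^ a0) * (b2 ^ b0)
--     c0 = z0 ^ p3 ^ c2 ^ c1
--     d0 = c0 ^ (a3 ^ a1 ^ a2 ^ a0) * (b3 ^ b1 ^ b2 ^ b0)
--     d1 = c1 ^ (a3 ^ a1) * (b3 ^ b1)
--     d2 = c2 ^ (a3 ^ a2) * (b3 ^ b2)
--     d3 = c3 ^ (a1 ^ a0) * (b1 ^ b0)
--     return [[a0, a1, a2, a3], [b0, b1, b2, b3], [d0, d1, d2, d3] + [0] * 15]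
-- ===== Notes on version B (the rewrite author's own statement) =====
-- stated objective: simpler
-- what changed: B replaces A's forward-then-uncompute simulation of the 19-register circuit (66 gate applications) by the closed-form net effect: the uncompute half restores every scratch register d[4..18] to 0, so B computes only the four surviving values d[0..3] directly as XOR/product expressions of x[0..3], y[0..3], z[0..3] and appends fifteen zeros.
import Mathlib
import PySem

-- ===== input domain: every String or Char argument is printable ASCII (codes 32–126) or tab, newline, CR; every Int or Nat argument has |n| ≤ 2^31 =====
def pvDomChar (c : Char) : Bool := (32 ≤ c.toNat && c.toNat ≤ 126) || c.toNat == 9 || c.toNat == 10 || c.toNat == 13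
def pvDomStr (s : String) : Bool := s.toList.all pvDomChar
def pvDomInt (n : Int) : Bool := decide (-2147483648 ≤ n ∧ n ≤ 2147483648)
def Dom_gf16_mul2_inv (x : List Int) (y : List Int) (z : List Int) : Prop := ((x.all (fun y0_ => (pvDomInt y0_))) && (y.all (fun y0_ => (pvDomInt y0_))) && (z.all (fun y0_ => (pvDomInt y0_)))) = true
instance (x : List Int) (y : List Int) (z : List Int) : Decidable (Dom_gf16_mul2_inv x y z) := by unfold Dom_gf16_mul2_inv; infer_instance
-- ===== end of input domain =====

-- B replaces A's full forward+uncompute gate simulation by the closed-form net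
-- effect of the circuit (the uncompute half zeroes all scratch registers);
-- objective: simpler.  Neither version mutates its arguments.

-- ===== PORT A =====
-- Literal transliteration of A.  All list indices in A are the constants 0..3
-- (resp. 0..18 for the scratch list d), so each cell is carried as one let
-- binding, updated in exactly A's line order; the reads x[i]/y[i]/z[i]
-- (which raise IndexError in Python iff a list is shorter than 4 — excluded
-- by Pre_) are ported with pyGetD, exact on Pre_.
def pvCx (x y : Int) : Int := PySem.Int.bxor x y
def pvCcx (y z x : Int) : Int := PySem.Int.bxor x (y * z)

def gf16_mul2_inv (x : List Int) (y : List Int) (z : List Int) : List (List Int) :=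
  let a0 := PySem.List.pyGetD x 0 0; let a1 := PySem.List.pyGetD x 1 0
  let a2 := PySem.List.pyGetD x 2 0; let a3 := PySem.List.pyGetD x 3 0
  let b0 := PySem.List.pyGetD y 0 0; let b1 := PySem.List.pyGetD y 1 0
  let b2 := PySem.List.pyGetD y 2 0; let b3 := PySem.List.pyGetD y 3 0
  let d0 := PySem.List.pyGetD z 0 0; let d1 := PySem.List.pyGetD z 1 0
  let d2 := PySem.List.pyGetD z 2 0; let d3 := PySem.List.pyGetD z 3 0
  let d4 : Int := 0; let d5 : Int := 0; let d6 : Int := 0; let d7 : Int := 0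
  let d8 : Int := 0; let d9 : Int := 0; let d10 : Int := 0; let d11 : Int := 0
  let d12 : Int := 0; let d13 : Int := 0; let d14 : Int := 0; let d15 : Int := 0
  let d16 : Int := 0; let d17 : Int := 0; let d18 : Int := 0
  let d6 := pvCx a3 d6;  let d6 := pvCx a1 d6
  let d7 := pvCx b3 d7;  let d7 := pvCx b1 d7
  let d8 := pvCx a3 d8;  let d8 := pvCx a2 d8
  let d9 := pvCx b3 d9;  let d9 := pvCx b2 d9
  let d10 := pvCx a2 d10; let d10 := pvCx a0 d10
  let d11 := pvCx b2 d11; let d11 := pvCx b0 d11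
  let d4 := pvCx d6 d4;  let d4 := pvCx d10 d4
  let d5 := pvCx d7 d5;  let d5 := pvCx d11 d5
  let d12 := pvCx a1 d12; let d12 := pvCx a0 d12
  let d13 := pvCx b1 d13; let d13 := pvCx b0 d13
  let d14 := pvCcx d10 d11 d14
  let d15 := pvCcx a3 b3 d15
  let d16 := pvCcx a2 b2 d16
  let d17 := pvCcx a1 b1 d17
  let d18 := pvCcx a0 b0 d18
  let d3 := pvCx d17 d3; let d3 := pvCx d16 d3; let d3 := pvCx d15 d3
  let d2 := pvCx d18 d2; let d2 := pvCx d15 d2; let d2 := pvCx d3 d2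
  let d1 := pvCx d16 d1; let d1 := pvCx d15 d1; let d1 := pvCx d14 d1
  let d0 := pvCx d15 d0; let d0 := pvCx d2 d0; let d0 := pvCx d1 d0
  let d18 := pvCcx a0 b0 d18
  let d17 := pvCcx a1 b1 d17
  let d16 := pvCcx a2 b2 d16
  let d15 := pvCcx a3 b3 d15
  let d14 := pvCcx d10 d11 d14
  let d3 := pvCcx d12 d13 d3
  let d2 := pvCcx d8 d9 d2
  let d1 := pvCcx d6 d7 d1
  let d0 := pvCcx d4 d5 d0
  let d13 := pvCx b1 d13; let d13 := pvCx b0 d13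
  let d12 := pvCx a1 d12; let d12 := pvCx a0 d12
  let d5 := pvCx d7 d5;  let d5 := pvCx d11 d5
  let d4 := pvCx d6 d4;  let d4 := pvCx d10 d4
  let d11 := pvCx b2 d11; let d11 := pvCx b0 d11
  let d10 := pvCx a2 d10; let d10 := pvCx a0 d10
  let d9 := pvCx b3 d9;  let d9 := pvCx b2 d9
  let d8 := pvCx a3 d8;  let d8 := pvCx a2 d8
  let d7 := pvCx b3 d7;  let d7 := pvCx b1 d7
  let d6 := pvCx a3 d6;  let d6 := pvCx a1 d6
  [[a0, a1, a2, a3], [b0, b1, b2, b3],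
   [d0, d1, d2, d3, d4, d5, d6, d7, d8, d9, d10, d11, d12, d13, d14, d15, d16, d17, d18]]

-- ===== PORT B =====
-- Transliteration of Source B: the closed-form residue of the circuit.
def gf16_mul2_inv_alt (x : List Int) (y : List Int) (z : List Int) : List (List Int) :=
  let X := PySem.Int.bxor
  let a0 := PySem.List.pyGetD x 0 0; let a1 := PySem.List.pyGetD x 1 0
  let a2 := PySem.List.pyGetD x 2 0; let a3 := PySem.List.pyGetD x 3 0
  let b0 := PySem.List.pyGetD y 0 0; let b1 := PySem.List.pyGetD y 1 0
  let b2 := PySem.List.pyGetD y 2 0; let b3 := PySem.List.pyGetD y 3 0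
  let z0 := PySem.List.pyGetD z 0 0; let z1 := PySem.List.pyGetD z 1 0
  let z2 := PySem.List.pyGetD z 2 0; let z3 := PySem.List.pyGetD z 3 0
  let p0 := a0 * b0; let p1 := a1 * b1; let p2 := a2 * b2; let p3 := a3 * b3
  let c3 := X (X (X z3 p1) p2) p3
  let c2 := X (X (X z2 p0) p3) c3
  let c1 := X (X (X z1 p2) p3) ((X a2 a0) * (X b2 b0))
  let c0 := X (X (X z0 p3) c2) c1
  let d0 := X c0 ((X (X (X a3 a1) a2) a0) * (X (X (X b3 b1) b2) b0))
  let d1 := X c1 ((X a3 a1) * (X b3 b1))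
  let d2 := X c2 ((X a3 a2) * (X b3 b2))
  let d3 := X c3 ((X a1 a0) * (X b1 b0))
  [[a0, a1, a2, a3], [b0, b1, b2, b3],
   [d0, d1, d2, d3, 0, 0, 0, 0, 0, 0, 0, 0, 0, 0, 0, 0, 0, 0, 0]]

-- ===== PRECONDITION & SPEC =====
-- Python A raises IndexError iff one of x, y, z has fewer than 4 elements.
def Pre_gf16_mul2_inv (x : List Int) (y : List Int) (z : List Int) : Prop :=
  4 ≤ x.length ∧ 4 ≤ y.length ∧ 4 ≤ z.length
instance (x : List Int) (y : List Int) (z : List Int) : Decidable (Pre_gf16_mul2_inv x y z) := by unfold Pre_gf16_mul2_inv; infer_instance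
def pvWitness_gf16_mul2_inv : List Int × List Int × List Int :=
  ([1, 0, 1, 1], [0, 1, 1, 0], [1, 1, 0, 1])
def Spec_gf16_mul2_inv (x : List Int) (y : List Int) (z : List Int) (out : List (List Int)) : Prop := out = gf16_mul2_inv_alt x y z
instance (x : List Int) (y : List Int) (z : List Int) (out : List (List Int)) : Decidable (Spec_gf16_mul2_inv x y z out) := by unfold Spec_gf16_mul2_inv; infer_instance

-- ===== CLAIM (what is proved, stated in full; the proofs are below) =====
def Claim_equal_gf16_mul2_inv : Prop := ∀ (x : List Int) (y : List Int) (z : List Int), Dom_gf16_mul2_inv x y z → Pre_gf16_mul2_inv x y z → Spec_gf16_mul2_inv x y z (gf16_mul2_inv x y z)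

-- ===== LEMMAS AND PROOFS =====

-- helper: every Int is pvEnc of a sign bit and a magnitude; bxor acts componentwise
def pvEnc (s : Bool) (k : Nat) : Int := if s then -(k : Int) - 1 else (k : Int)

theorem pvBxor_enc (s t : Bool) (k m : Nat) :
    PySem.Int.bxor (pvEnc s k) (pvEnc t m) = pvEnc (xor s t) (k ^^^ m) := by
  cases s <;> cases t <;>
    simp [pvEnc, PySem.Int.bxor] <;> first
      | rfl
      | (intros; omega)

theorem pvEnc_surj (a : Int) : ∃ s k, a = pvEnc s k := by
  rcases a with n | n
  · exact ⟨false, n, rfl⟩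
  · exact ⟨true, n, by simp [pvEnc, Int.negSucc_eq]; ring⟩

theorem pvBxor_assoc (a b c : Int) :
    PySem.Int.bxor (PySem.Int.bxor a b) c = PySem.Int.bxor a (PySem.Int.bxor b c) := by
  obtain ⟨s, k, rfl⟩ := pvEnc_surj a
  obtain ⟨t, m, rfl⟩ := pvEnc_surj b
  obtain ⟨u, n, rfl⟩ := pvEnc_surj c
  simp [pvBxor_enc, Nat.xor_assoc]

theorem pvBxor_left_comm (a b c : Int) :
    PySem.Int.bxor a (PySem.Int.bxor b c) = PySem.Int.bxor b (PySem.Int.bxor a c) := by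
  rw [← pvBxor_assoc, PySem.Int.bxor_comm a b, pvBxor_assoc]

theorem pvBxor_zero_left (a : Int) : PySem.Int.bxor 0 a = a := by
  rw [PySem.Int.bxor_comm]; exact PySem.Int.bxor_zero a

theorem pvBxor_cancel_left (a b : Int) : PySem.Int.bxor a (PySem.Int.bxor a b) = b := by
  rw [← pvBxor_assoc, PySem.Int.bxor_self, pvBxor_zero_left]

-- ===== VERDICT (by name: the statement is the Claim_ definition above) =====
theorem gf16_mul2_inv_spec : Claim_equal_gf16_mul2_inv := by
  intro x y z _ _
  unfold Spec_gf16_mul2_inv gf16_mul2_inv gf16_mul2_inv_alt pvCx pvCcx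
  simp only [PySem.Int.bxor_zero, pvBxor_zero_left]
  simp [pvBxor_assoc, PySem.Int.bxor_comm, pvBxor_left_comm, PySem.Int.bxor_self,
        pvBxor_zero_left, pvBxor_cancel_left]
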